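-- pv_equiv track=rewrite | github.com/KatyaM8/system_analysis | task3/task.py | _find_contradiction_core
-- ===== SOURCE A (Python) =====
-- from typing import List, Dict, Tuple, Union
--
-- def _transpose(mat: List[List[int]]) -> List[List[int]]:
--     return [list(row) for row in zip(*mat)]
--
-- def _mat_and(A: List[List[int]], B: List[List[int]]) -> List[List[int]]:
--     n = len(A)
--     m = len(A[0])
--     return [[A[i][j] & B[i][j] for j in range(m)] for i in range(n)]
--
-- def _mat_or(A: List[List[int]], B: List[List[int]]) -> List[List[int]]:
--     n = len(A)
--     m = len(A[0])
--     return [[A[i][j] | B[i][j] for j in range(m)] for i in range(n)]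
--
-- def _find_contradiction_core(
--     objects: List[int],
--     YA: List[List[int]],
--     YB: List[List[int]],
-- ) -> Tuple[List[Tuple[int, int]], List[List[int]]]:
--     """
--     Этап 1: поиск ядра противоречий S(A,B).
--
--     1) YAB   = YA ◦ YB   (поэлементная конъюнкция)
--     2) YAB'  = YA^T ◦ YB^T
--     3) M     = YAB ∨ YAB' (поэлементное логическое сложение)
--     4) Пара (i,j) входит в ядро, если
--            M[i,j] == 0 и M[j,i] == 0.
--
--     Возвращает:
--         - список пар (объект_i, объект_j) в ядре;
--         - матрицу YAB (она пригодится на этапе 2).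
--     """
--     YAT = _transpose(YA)
--     YBT = _transpose(YB)
--
--     YAB = _mat_and(YA, YB)
--     YAB_T = _mat_and(YAT, YBT)
--
--     M = _mat_or(YAB, YAB_T)
--
--     n = len(objects)
--     core_pairs: List[Tuple[int, int]] = []
--     for i in range(n):
--         for j in range(i + 1, n):
--             if M[i][j] == 0 and M[j][i] == 0:
--                 core_pairs.append((objects[i], objects[j]))
--
--
--
--     #отсортировываю ядро, чтобы результат был детерминированным
--     core_pairs.sort()
--     return core_pairs, YAB
-- ===== SOURCE B (Python) =====
-- from typing import List, Tuple
--
-- def _find_contradiction_core(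
--     objects: List[int],
--     YA: List[List[int]],
--     YB: List[List[int]],
-- ) -> Tuple[List[Tuple[int, int]], List[List[int]]]:
--     # Only YAB is needed: for square matrices M[i][j] = YAB[i][j] | YAB[j][i],
--     # so M[i][j] == M[j][i] == 0 reduces to YAB[i][j] == YAB[j][i] == 0.
--     width = len(YA[0])
--     YAB = [[ra[j] & rb[j] for j in range(width)] for ra, rb in zip(YA, YB)]
--     n = len(objects)
--     core_pairs = sorted(
--         (objects[i], objects[j])
--         for i in range(n)
--         for j in range(i + 1, n)
--         if YAB[i][j] == 0 and YAB[j][i] == 0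
--     )
--     return core_pairs, YAB
-- ===== Notes on version B (the rewrite author's own statement) =====
-- stated objective: simpler
-- what changed: B builds only the YAB conjunction matrix (via zip over the rows) and tests YAB[i][j]==0 and YAB[j][i]==0 directly, dropping A's two transposes, second AND matrix and OR matrix, which are algebraically redundant on square inputs.
import Mathlib
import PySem

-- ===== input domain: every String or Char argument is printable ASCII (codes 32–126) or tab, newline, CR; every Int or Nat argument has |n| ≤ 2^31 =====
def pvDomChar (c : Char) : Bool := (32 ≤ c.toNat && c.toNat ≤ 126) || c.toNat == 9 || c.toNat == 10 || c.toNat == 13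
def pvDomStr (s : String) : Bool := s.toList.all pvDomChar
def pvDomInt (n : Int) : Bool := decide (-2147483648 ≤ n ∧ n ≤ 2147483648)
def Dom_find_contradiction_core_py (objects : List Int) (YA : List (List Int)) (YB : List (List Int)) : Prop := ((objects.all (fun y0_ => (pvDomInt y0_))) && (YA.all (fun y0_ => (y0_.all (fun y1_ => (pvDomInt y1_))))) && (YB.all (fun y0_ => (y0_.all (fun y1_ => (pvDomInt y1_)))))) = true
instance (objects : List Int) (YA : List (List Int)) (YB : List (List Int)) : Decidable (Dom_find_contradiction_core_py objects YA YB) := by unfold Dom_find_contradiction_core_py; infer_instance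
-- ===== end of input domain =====

-- ===== PORT A =====
-- B drops the transpose / second AND / OR matrices that A builds: on square inputs they are
-- redundant, and only the YAB matrix together with the direct symmetric zero test remains.
-- (equivalence is about return values; neither program mutates its arguments)

-- zip(*mat): column count = minimum row length (min folded over all row lengths)
def pyTranspose (mat : List (List Int)) : List (List Int) :=
  if mat = [] then []
  else
    (List.range ((mat.map List.length).foldl min ((mat.headD []).length))).map
      (fun j => mat.map (fun row => row.getD j 0))

def pyMatAnd (A B : List (List Int)) : List (List Int) :=
  (List.range A.length).map (fun i =>
    (List.range ((A.headD []).length)).map (fun j =>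
      PySem.Int.band ((A.getD i []).getD j 0) ((B.getD i []).getD j 0)))

def pyMatOr (A B : List (List Int)) : List (List Int) :=
  (List.range A.length).map (fun i =>
    (List.range ((A.headD []).length)).map (fun j =>
      PySem.Int.bor ((A.getD i []).getD j 0) ((B.getD i []).getD j 0)))

def find_contradiction_core_py (objects : List Int) (YA : List (List Int)) (YB : List (List Int)) : (List (Int × Int)) × List (List Int) :=
  let YAT := pyTranspose YA
  let YBT := pyTranspose YB
  let YAB := pyMatAnd YA YB
  let YAB_T := pyMatAnd YAT YBT
  let M := pyMatOr YAB YAB_T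
  let n : Int := objects.length
  let core := (PySem.List.pyRange 0 n 1).foldl (fun acc i =>
      (PySem.List.pyRange (i + 1) n 1).foldl (fun acc2 j =>
        if PySem.List.pyGetD (PySem.List.pyGetD M i []) j 0 = 0 ∧
           PySem.List.pyGetD (PySem.List.pyGetD M j []) i 0 = 0 then
          acc2 ++ [(PySem.List.pyGetD objects i 0, PySem.List.pyGetD objects j 0)]
        else acc2) acc) ([] : List (Int × Int))
  (PySem.List.sorted2 core Prod.fst Prod.snd, YAB)

-- ===== PORT B =====
def find_contradiction_core_py_alt (objects : List Int) (YA : List (List Int)) (YB : List (List Int)) : (List (Int × Int)) × List (List Int) :=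
  let width := (YA.headD []).length
  let YAB := (YA.zip YB).map (fun rp =>
      (List.range width).map (fun j => PySem.Int.band (rp.1.getD j 0) (rp.2.getD j 0)))
  let n : Int := objects.length
  let core := (PySem.List.pyRange 0 n 1).flatMap (fun i =>
      ((PySem.List.pyRange (i + 1) n 1).filter (fun j =>
          decide (PySem.List.pyGetD (PySem.List.pyGetD YAB i []) j 0 = 0 ∧
                  PySem.List.pyGetD (PySem.List.pyGetD YAB j []) i 0 = 0))).map
        (fun j => (PySem.List.pyGetD objects i 0, PySem.List.pyGetD objects j 0)))
  (PySem.List.sorted2 core Prod.fst Prod.snd, YAB)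

-- ===== PRECONDITION & SPEC =====
-- Pre_ restricts to nonempty square matrices of one common size with len(objects) ≤ that size:
-- on essentially all other shapes A's transpose/AND/OR pipeline raises IndexError; the only
-- excluded inputs on which A still returns are ragged rows carrying extra trailing entries,
-- which both programs ignore identically (excluded only to keep the shape condition closed-form).
def Pre_find_contradiction_core_py (objects : List Int) (YA : List (List Int)) (YB : List (List Int)) : Prop :=
  YA ≠ [] ∧ YB.length = YA.length ∧
  (∀ r ∈ YA, r.length = YA.length) ∧ (∀ r ∈ YB, r.length = YA.length) ∧
  objects.length ≤ YA.length
instance (objects : List Int) (YA : List (List Int)) (YB : List (List Int)) : Decidable (Pre_find_contradiction_core_py objects YA YB) := by unfold Pre_find_contradiction_core_py; infer_instance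

def pvWitness_find_contradiction_core_py : List Int × List (List Int) × List (List Int) :=
  ([1, 2], [[1, 0], [0, 0]], [[1, 0], [0, 0]])

def Spec_find_contradiction_core_py (objects : List Int) (YA : List (List Int)) (YB : List (List Int)) (out : (List (Int × Int)) × List (List Int)) : Prop := out = find_contradiction_core_py_alt objects YA YB
instance (objects : List Int) (YA : List (List Int)) (YB : List (List Int)) (out : (List (Int × Int)) × List (List Int)) : Decidable (Spec_find_contradiction_core_py objects YA YB out) := by unfold Spec_find_contradiction_core_py; infer_instance

-- ===== CLAIM (what is proved, stated in full; the proofs are below) =====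
def Claim_equal_find_contradiction_core_py : Prop := ∀ (objects : List Int) (YA : List (List Int)) (YB : List (List Int)), Dom_find_contradiction_core_py objects YA YB → Pre_find_contradiction_core_py objects YA YB → Spec_find_contradiction_core_py objects YA YB (find_contradiction_core_py objects YA YB)

-- ===== LEMMAS AND PROOFS =====

theorem bor_eq_zero_iff (a b : Int) : PySem.Int.bor a b = 0 ↔ a = 0 ∧ b = 0 := by
  unfold PySem.Int.bor
  split_ifs with h1 h2 h2
  · constructor
    · intro h
      have h' : a.toNat ||| b.toNat = 0 := by exact_mod_cast h
      have ha : a.toNat = 0 := Nat.le_zero.mp (h' ▸ Nat.left_le_or)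
      have hb : b.toNat = 0 := Nat.le_zero.mp (h' ▸ (Nat.lor_comm a.toNat b.toNat ▸ Nat.left_le_or))
      omega
    · rintro ⟨rfl, rfl⟩; simp
  · omega
  · omega
  · omega

theorem foldl_min_const (l : List Nat) (k : Nat) (h : ∀ x ∈ l, x = k) : l.foldl min k = k := by
  induction l with
  | nil => rfl
  | cons x xs ih =>
    have hx : x = k := h x (by simp)
    simp only [List.foldl_cons, hx, min_self]
    exact ih (fun y hy => h y (by simp [hy]))

-- entry of a [[f i j for j in range b] for i in range a] grid, via getD
theorem grid_entry (f : Nat → Nat → Int) (a b i j : Nat) (hi : i < a) (hj : j < b) :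
    ((((List.range a).map (fun i => (List.range b).map (fun j => f i j))).getD i []).getD j 0) = f i j := by
  simp [List.getD_eq_getElem?_getD, hi, hj]

theorem grid_head_len (f : Nat → List Int) (k : Nat) (hk : 0 < k) (hf : ∀ i, (f i).length = k) :
    (((List.range k).map f).headD []).length = k := by
  obtain ⟨k', rfl⟩ : ∃ k', k = k' + 1 := ⟨k - 1, by omega⟩
  rw [List.range_succ_eq_map]
  simp [hf 0]

theorem transpose_eq (mat : List (List Int)) (hne : mat ≠ [])
    (hsq : ∀ r ∈ mat, r.length = mat.length) :
    pyTranspose mat =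
      (List.range mat.length).map (fun j => (List.range mat.length).map (fun i => ((mat.getD i []).getD j 0))) := by
  have hhead : (mat.headD []).length = mat.length := by
    cases mat with
    | nil => exact absurd rfl hne
    | cons r rs => exact hsq r (by simp)
  have hmin : (mat.map List.length).foldl min ((mat.headD []).length) = mat.length := by
    rw [hhead]
    exact foldl_min_const _ _ (by
      intro x hx
      obtain ⟨row, hrow, rfl⟩ := List.mem_map.mp hx
      exact hsq row hrow)
  rw [pyTranspose, if_neg hne, hmin]
  apply List.map_congr_left
  intro j _
  apply List.ext_getElem (by simp)
  intro i h1 h2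
  simp [List.getD_eq_getElem?_getD, (by simpa using h1 : i < mat.length)]

-- ===== VERDICT (by name: the statement is the Claim_ definition above) =====
theorem find_contradiction_core_py_spec : Claim_equal_find_contradiction_core_py := by
  intro objects YA YB _hdom hpre
  obtain ⟨hne, hlenB, hsqA, hsqB, hn⟩ := hpre
  unfold Spec_find_contradiction_core_py
  have hkpos : 0 < YA.length := by
    cases YA with
    | nil => exact absurd rfl hne
    | cons r rs => simp
  have hheadA : (YA.headD []).length = YA.length := by
    cases YA with
    | nil => exact absurd rfl hne
    | cons r rs => exact hsqA r (by simp)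
  -- B's YAB as an index grid
  have hgrid : (YA.zip YB).map (fun rp =>
        (List.range YA.length).map (fun j => PySem.Int.band (rp.1.getD j 0) (rp.2.getD j 0)))
      = (List.range YA.length).map (fun i => (List.range YA.length).map (fun j =>
          PySem.Int.band ((YA.getD i []).getD j 0) ((YB.getD i []).getD j 0))) := by
    apply List.ext_getElem (by simp [hlenB])
    intro i h1 h2
    have hiYA : i < YA.length := by simp [hlenB] at h1; omega
    have hiYB : i < YB.length := by omega
    simp [List.getElem_zip, List.getD_eq_getElem?_getD, hiYA, hiYB]
  -- the two YAB matrices coincide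
  have hYAB : pyMatAnd YA YB = (YA.zip YB).map (fun rp =>
        (List.range YA.length).map (fun j => PySem.Int.band (rp.1.getD j 0) (rp.2.getD j 0))) := by
    unfold pyMatAnd; simp only [hheadA]; exact hgrid.symm
  have hYABentry : ∀ i j : Nat, i < YA.length → j < YA.length →
      (((pyMatAnd YA YB).getD i []).getD j 0) =
        PySem.Int.band ((YA.getD i []).getD j 0) ((YB.getD i []).getD j 0) := by
    intro i j hi hj
    rw [hYAB, hgrid]
    exact grid_entry _ _ _ i j hi hj
  -- transposes as index grids
  have hTA := transpose_eq YA hne hsqA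
  have hneB : YB ≠ [] := by
    intro h; rw [h] at hlenB; simp at hlenB; omega
  have hTB : pyTranspose YB =
      (List.range YA.length).map (fun j => (List.range YA.length).map (fun i => ((YB.getD i []).getD j 0))) := by
    have := transpose_eq YB hneB (by intro r hr; rw [hlenB]; exact hsqB r hr)
    rw [this, hlenB]
  have hTAlen : (pyTranspose YA).length = YA.length := by rw [hTA]; simp
  have hTAhead : ((pyTranspose YA).headD []).length = YA.length := by
    rw [hTA]
    exact grid_head_len _ _ hkpos (by intro i; simp)
  -- entries of the second AND matrix are the YAB entries transposed
  have hYABTentry : ∀ i j : Nat, i < YA.length → j < YA.length →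
      (((pyMatAnd (pyTranspose YA) (pyTranspose YB)).getD i []).getD j 0) =
        (((pyMatAnd YA YB).getD j []).getD i 0) := by
    intro i j hi hj
    unfold pyMatAnd
    rw [hTAlen, hTAhead, hheadA]
    rw [grid_entry _ _ _ i j hi hj, grid_entry _ _ _ j i hj hi]
    rw [hTA, hTB]
    rw [grid_entry _ _ _ i j hi hj, grid_entry _ _ _ i j hi hj]
  -- shape of YAB
  have hYABlen : (pyMatAnd YA YB).length = YA.length := by unfold pyMatAnd; simp
  have hYABhead : ((pyMatAnd YA YB).headD []).length = YA.length := by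
    unfold pyMatAnd
    rw [hheadA]
    exact grid_head_len _ _ hkpos (by intro i; simp)
  -- entries of M
  have hMentry : ∀ i j : Nat, i < YA.length → j < YA.length →
      (((pyMatOr (pyMatAnd YA YB) (pyMatAnd (pyTranspose YA) (pyTranspose YB))).getD i []).getD j 0) =
        PySem.Int.bor (((pyMatAnd YA YB).getD i []).getD j 0) (((pyMatAnd YA YB).getD j []).getD i 0) := by
    intro i j hi hj
    unfold pyMatOr
    rw [hYABlen, hYABhead]
    rw [grid_entry _ _ _ i j hi hj, hYABTentry i j hi hj]
  -- nonnegative double indexing reduces to Nat getD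
  have hconv : ∀ (L : List (List Int)) (p q : Int), 0 ≤ p → 0 ≤ q →
      PySem.List.pyGetD (PySem.List.pyGetD L p []) q 0 = ((L.getD p.toNat []).getD q.toNat 0) := by
    intro L p q hp hq
    rw [← Int.toNat_of_nonneg hp, ← Int.toNat_of_nonneg hq,
        PySem.List.pyGetD_natCast, PySem.List.pyGetD_natCast, Int.toNat_natCast, Int.toNat_natCast]
  -- unfold both ports, reduce A's loops to flatMap/filter/map, and compare
  simp only [find_contradiction_core_py, find_contradiction_core_py_alt, hheadA,
    PySem.List.foldl_append_ite, PySem.List.foldl_append_eq_flatMap, List.nil_append,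
    Prod.mk.injEq]
  refine ⟨congrArg (fun c => PySem.List.sorted2 c Prod.fst Prod.snd) ?_, hYAB⟩
  apply List.flatMap_congr
  intro i hi
  obtain ⟨hi0, hin⟩ := (PySem.List.mem_pyRange_one).mp hi
  congr 1
  apply List.filter_congr
  intro j hj
  obtain ⟨hj1, hjn⟩ := (PySem.List.mem_pyRange_one).mp hj
  have hj0 : (0 : Int) ≤ j := by omega
  have hik : i.toNat < YA.length := by omega
  have hjk : j.toNat < YA.length := by omega
  rw [hconv _ i j hi0 hj0, hconv _ j i hj0 hi0,
      hconv _ i j hi0 hj0, hconv _ j i hj0 hi0,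
      hMentry i.toNat j.toNat hik hjk, hMentry j.toNat i.toNat hjk hik]
  rw [decide_eq_decide, ← hYAB]
  rw [bor_eq_zero_iff, bor_eq_zero_iff]
  tauto
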